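-- pv_equiv track=rewrite | github.com/nbroadbent/Python-Assignments | a5_8709720/a5_part1_8709720.py | largest_34
-- ===== SOURCE A (Python) =====
-- def largest_34(a):
--     '''(list)->int
--
--     Returns the sum of the 3rd and 4th largest values in a list, a.
--     '''
--
--     l = [0]*4
--
--     for i in range(len(a)):
--         # Check if current item is larger than the current 4 largest
--         # Insert item and move others if necessary
--         if a[i] > l[0]:
--             l[3] = l[2]
--             l[2] = l[1]
--             l[1] = l[0]
--             l[0] = a[i]
--         elif a[i] > l[1]:
--             l[3] = l[2]
--             l[2] = l[1]
--             l[1] = a[i]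
--         elif a[i] > l[2]:
--             l[3] = l[2]
--             l[2] = a[i]
--         elif a[i] > l[3]:
--             l[3] = a[i]
--
--     # Return the sum of the 3rd and 4th largest values
--     return l[2]+l[3]
-- ===== SOURCE B (Python) =====
-- def largest_34(a):
--     s = sorted(a + [0, 0, 0, 0], reverse=True)
--     return s[2] + s[3]
-- ===== Notes on version B (the rewrite author's own statement) =====
-- stated objective: simpler
-- what changed: Replaces the hand-rolled single-pass top-4 insertion with shifting slots by padding the list with four zero sentinels, sorting descending, and returning the 3rd+4th elements.
import Mathlib
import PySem

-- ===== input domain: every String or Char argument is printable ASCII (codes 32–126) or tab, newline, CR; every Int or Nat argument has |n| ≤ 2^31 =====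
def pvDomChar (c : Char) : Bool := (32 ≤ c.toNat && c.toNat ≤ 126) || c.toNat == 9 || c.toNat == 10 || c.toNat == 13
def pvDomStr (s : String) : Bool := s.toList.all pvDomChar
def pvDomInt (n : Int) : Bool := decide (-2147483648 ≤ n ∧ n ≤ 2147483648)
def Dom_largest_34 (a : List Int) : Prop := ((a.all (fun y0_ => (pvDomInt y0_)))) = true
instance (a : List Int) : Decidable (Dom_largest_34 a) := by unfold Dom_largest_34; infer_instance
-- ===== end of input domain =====

-- B pads with four zero sentinels (mirroring A's zero-initialised slots), sorts descending
-- and indexes, instead of A's manual four-slot insertion pass; objective: simpler.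

-- ===== PORT A =====
def largest_34 (a : List Int) : Int :=
  let l :=
    (PySem.List.pyRange 0 (a.length : Int) 1).foldl
      (fun (l : Int × Int × Int × Int) i =>
        let ai := PySem.List.pyGetD a i 0
        if ai > l.1 then (ai, l.1, l.2.1, l.2.2.1)
        else if ai > l.2.1 then (l.1, ai, l.2.1, l.2.2.1)
        else if ai > l.2.2.1 then (l.1, l.2.1, ai, l.2.2.1)
        else if ai > l.2.2.2 then (l.1, l.2.1, l.2.2.1, ai)
        else l)
      (0, 0, 0, 0)
  l.2.2.1 + l.2.2.2

-- ===== PORT B =====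
def largest_34_alt (a : List Int) : Int :=
  let s := PySem.List.sorted (a ++ [0, 0, 0, 0]) (fun x => x) true
  PySem.List.pyGetD s 2 0 + PySem.List.pyGetD s 3 0

-- ===== PRECONDITION & SPEC =====
def Spec_largest_34 (a : List Int) (out : Int) : Prop := out = largest_34_alt a
instance (a : List Int) (out : Int) : Decidable (Spec_largest_34 a out) := by unfold Spec_largest_34; infer_instance

-- ===== CLAIM (what is proved, stated in full; the proofs are below) =====
def Claim_equal_largest_34 : Prop := ∀ (a : List Int), Dom_largest_34 a → Spec_largest_34 a (largest_34 a)

-- ===== LEMMAS AND PROOFS =====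

-- A's loop body as a step function on the four slots
def ins (l : Int × Int × Int × Int) (x : Int) : Int × Int × Int × Int :=
  if x > l.1 then (x, l.1, l.2.1, l.2.2.1)
  else if x > l.2.1 then (l.1, x, l.2.1, l.2.2.1)
  else if x > l.2.2.1 then (l.1, l.2.1, x, l.2.2.1)
  else if x > l.2.2.2 then (l.1, l.2.1, l.2.2.1, x)
  else l

-- insertion into a descending list, equal elements kept in front (matches strict '>')
def insD (x : Int) : List Int → List Int
  | [] => [x]
  | a :: t => if x > a then x :: a :: t else a :: insD x t

theorem insD_perm (x : Int) (s : List Int) : (insD x s).Perm (x :: s) := by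
  induction s with
  | nil => simp [insD]
  | cons a t ih =>
    simp only [insD]
    split
    · exact List.Perm.refl _
    · exact (ih.cons a).trans (List.Perm.swap x a t)

theorem insD_pairwise (x : Int) (s : List Int)
    (h : s.Pairwise (· ≥ ·)) : (insD x s).Pairwise (· ≥ ·) := by
  induction s with
  | nil => simp [insD]
  | cons a t ih =>
    rw [List.pairwise_cons] at h
    simp only [insD]
    split
    · rename_i hx
      refine List.pairwise_cons.2 ⟨?_, List.pairwise_cons.2 ⟨h.1, h.2⟩⟩
      intro y hy
      rcases List.mem_cons.1 hy with hy1 | hy2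
      · omega
      · have := h.1 y hy2; omega
    · rename_i hx
      refine List.pairwise_cons.2 ⟨?_, ih h.2⟩
      intro y hy
      rcases List.mem_cons.1 ((insD_perm x t).mem_iff.1 hy) with hy1 | hy2
      · omega
      · exact h.1 y hy2

theorem insD_head4 (x a b c d : Int) (r : List Int) :
    ∃ r', insD x (a :: b :: c :: d :: r) =
      (ins (a, b, c, d) x).1 :: (ins (a, b, c, d) x).2.1 ::
      (ins (a, b, c, d) x).2.2.1 :: (ins (a, b, c, d) x).2.2.2 :: r' := by
  simp only [insD, ins]
  split_ifs <;> exact ⟨_, rfl⟩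

theorem foldl_insD_head4 (xs : List Int) (a b c d : Int) (r : List Int) :
    ∃ r', xs.foldl (fun s x => insD x s) (a :: b :: c :: d :: r) =
      (xs.foldl ins (a, b, c, d)).1 :: (xs.foldl ins (a, b, c, d)).2.1 ::
      (xs.foldl ins (a, b, c, d)).2.2.1 :: (xs.foldl ins (a, b, c, d)).2.2.2 :: r' := by
  induction xs generalizing a b c d r with
  | nil => exact ⟨r, rfl⟩
  | cons x xs ih =>
    obtain ⟨r1, h1⟩ := insD_head4 x a b c d r
    simp only [List.foldl_cons, h1]
    exact ih _ _ _ _ r1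

theorem foldl_insD_perm (xs : List Int) (s : List Int) :
    (xs.foldl (fun s x => insD x s) s).Perm (s ++ xs) := by
  induction xs generalizing s with
  | nil => simp
  | cons x xs ih =>
    simp only [List.foldl_cons]
    refine (ih (insD x s)).trans ?_
    refine ((insD_perm x s).append_right xs).trans ?_
    simpa using List.perm_middle.symm

theorem foldl_insD_pairwise (xs : List Int) (s : List Int)
    (h : s.Pairwise (· ≥ ·)) :
    (xs.foldl (fun s x => insD x s) s).Pairwise (· ≥ ·) := by
  induction xs generalizing s with
  | nil => exact h
  | cons x xs ih => exact ih _ (insD_pairwise x s h)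

theorem sorted_eq_foldl_insD (a : List Int) :
    PySem.List.sorted (a ++ [0, 0, 0, 0]) (fun x => x) true =
      a.foldl (fun s x => insD x s) [0, 0, 0, 0] := by
  haveI anti : Std.Antisymm (α := Int) (· ≥ ·) := ⟨fun a b h1 h2 => le_antisymm h2 h1⟩
  have hperm : (PySem.List.sorted (a ++ [0, 0, 0, 0]) (fun x => x) true).Perm
      (a.foldl (fun s x => insD x s) [0, 0, 0, 0]) :=
    (PySem.List.sorted_perm _ _ _).trans
      ((List.perm_append_comm).trans (foldl_insD_perm a [0,0,0,0]).symm)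
  refine List.Perm.eq_of_pairwise' (r := fun (x y : Int) => x ≥ y) ?_ ?_ hperm
  · exact PySem.List.sorted_pairwise_rev (xs := a ++ [0,0,0,0]) (key := fun x => x)
  · exact foldl_insD_pairwise a [0,0,0,0] (by decide)

-- ===== VERDICT (by name: the statement is the Claim_ definition above) =====
theorem largest_34_spec : Claim_equal_largest_34 := by
  intro a _
  show largest_34 a = largest_34_alt a
  have hA : largest_34 a = (a.foldl ins (0,0,0,0)).2.2.1 + (a.foldl ins (0,0,0,0)).2.2.2 :=
    congrArg (fun p : Int × Int × Int × Int => p.2.2.1 + p.2.2.2)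
      (PySem.List.foldl_pyRange_zero_pyGetD' a 0 ins (0,0,0,0))
  obtain ⟨r', hr⟩ := foldl_insD_head4 a 0 0 0 0 []
  unfold largest_34_alt
  rw [hA, sorted_eq_foldl_insD, hr]
  simp [PySem.List.pyGetD, PySem.List.pyGet?_of_nonneg]
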